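-- pv_equiv track=rewrite | github.com/TLearnQ/TL034_PRIYANKA-C-P_Set4 | Q20.py | process_log_lines
-- ===== SOURCE A (Python) =====
-- def process_log_lines(lines):
--
--
--     audit = []
--     errors = 0
--     processed = 0
--
--     for line in lines:
--         processed += 1
--         try:
--             text = line.strip()
--             if text.startswith("ERROR") or text.startswith("WARN"):
--                 audit.append(text)
--                 if text.startswith("ERROR"):
--                     errors += 1
--         except Exception as e:
--
--
--
--             audit.append(f"PROCESSING_ERROR: {e}")
--
--     summary = {
--         "processed": processed,
--         "audit_count": len(audit),
--         "error_count": errors,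
--     }
--     return audit, summary
-- ===== SOURCE B (Python) =====
-- def process_log_lines(lines):
--     # Divide-and-conquer: recursively solve each half of the line list and
--     # merge (audit, errors, processed) triples; no running counters.
--     def solve(chunk):
--         if not chunk:
--             return [], 0, 0
--         if len(chunk) == 1:
--             t = chunk[0].strip()
--             if t.startswith("ERROR"):
--                 return [t], 1, 1
--             if t.startswith("WARN"):
--                 return [t], 0, 1
--             return [], 0, 1
--         mid = len(chunk) // 2
--         a1, e1, p1 = solve(chunk[:mid])
--         a2, e2, p2 = solve(chunk[mid:])
--         return a1 + a2, e1 + e2, p1 + p2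
--
--     audit, errors, processed = solve(list(lines))
--     summary = {
--         "processed": processed,
--         "audit_count": len(audit),
--         "error_count": errors,
--     }
--     return audit, summary
-- ===== Notes on version B (the rewrite author's own statement) =====
-- stated objective: alternative
-- what changed: Replaces A's single linear scan with three mutable counters by a divide-and-conquer recursion that solves each half of the list and merges (audit, errors, processed) triples.
import Mathlib
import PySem

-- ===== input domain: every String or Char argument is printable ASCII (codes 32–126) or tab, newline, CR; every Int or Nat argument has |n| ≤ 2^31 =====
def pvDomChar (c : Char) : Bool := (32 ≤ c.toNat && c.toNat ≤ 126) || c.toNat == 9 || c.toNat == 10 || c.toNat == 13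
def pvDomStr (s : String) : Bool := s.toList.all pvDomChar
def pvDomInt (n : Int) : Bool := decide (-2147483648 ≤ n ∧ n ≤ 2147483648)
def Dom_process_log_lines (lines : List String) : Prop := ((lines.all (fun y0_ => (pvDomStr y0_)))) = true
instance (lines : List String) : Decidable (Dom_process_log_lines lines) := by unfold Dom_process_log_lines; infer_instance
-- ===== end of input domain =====

-- B replaces A's single linear scan with running counters by a divide-and-conquer
-- recursion on list halves that merges (audit, errors, processed) triples (objective: alternative).

-- ===== PORT A =====
-- A's loop body (the try/except never fires: str.strip cannot raise).
def pvStepA (st : List String × Int × Int) (line : String) : List String × Int × Int :=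
  let processed := st.2.2 + 1
  let text := PySem.Str.strip line
  if PySem.Str.startswith text "ERROR" || PySem.Str.startswith text "WARN" then
    (st.1 ++ [text],
     (if PySem.Str.startswith text "ERROR" then st.2.1 + 1 else st.2.1),
     processed)
  else
    (st.1, st.2.1, processed)

def process_log_lines (lines : List String) : List String × (List (String × Int)) :=
  let st := lines.foldl pvStepA ([], 0, 0)
  (st.1, [("processed", st.2.2), ("audit_count", (st.1.length : Int)), ("error_count", st.2.1)])

-- ===== PORT B =====
-- B's recursive helper `solve`: chunk[:mid] / chunk[mid:] become take/drop.
def pvSolveB : List String → List String × Int × Int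
  | [] => ([], 0, 0)
  | [l] =>
      let t := PySem.Str.strip l
      if PySem.Str.startswith t "ERROR" then ([t], 1, 1)
      else if PySem.Str.startswith t "WARN" then ([t], 0, 1)
      else ([], 0, 1)
  | l₁ :: l₂ :: rest =>
      let chunk := l₁ :: l₂ :: rest
      let mid := chunk.length / 2
      let r1 := pvSolveB (chunk.take mid)
      let r2 := pvSolveB (chunk.drop mid)
      (r1.1 ++ r2.1, r1.2.1 + r2.2.1, r1.2.2 + r2.2.2)
termination_by ls => ls.length
decreasing_by
  · simp [List.length_take]; omega
  · simp [List.length_drop]; omega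

def process_log_lines_alt (lines : List String) : List String × (List (String × Int)) :=
  let st := pvSolveB lines
  (st.1, [("processed", st.2.2), ("audit_count", (st.1.length : Int)), ("error_count", st.2.1)])

-- ===== PRECONDITION & SPEC =====
def Spec_process_log_lines (lines : List String) (out : List String × (List (String × Int))) : Prop := out = process_log_lines_alt lines
instance (lines : List String) (out : List String × (List (String × Int))) : Decidable (Spec_process_log_lines lines out) := by unfold Spec_process_log_lines; infer_instance

-- ===== CLAIM (what is proved, stated in full; the proofs are below) =====
def Claim_equal_process_log_lines : Prop := ∀ (lines : List String), Dom_process_log_lines lines → Spec_process_log_lines lines (process_log_lines lines)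

-- ===== LEMMAS AND PROOFS =====
def pvFilt (ls : List String) : List String :=
  (ls.map PySem.Str.strip).filter
    (fun t => PySem.Str.startswith t "ERROR" || PySem.Str.startswith t "WARN")

theorem pvFoldA (lines : List String) : ∀ (a : List String) (e p : Int),
    lines.foldl pvStepA (a, e, p) =
      (a ++ pvFilt lines,
       e + ((pvFilt lines).countP (fun t => PySem.Str.startswith t "ERROR") : Nat),
       p + (lines.length : Int)) := by
  induction lines with
  | nil => intro a e p; simp [pvFilt]
  | cons l ls ih =>
    intro a e p
    by_cases hE : PySem.Chars.startswith (PySem.Chars.strip l.toList) ['E','R','R','O','R'] = true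
    · simp [pvStepA, pvFilt, hE, ih]
      omega
    · by_cases hW : PySem.Chars.startswith (PySem.Chars.strip l.toList) ['W','A','R','N'] = true
      · simp [pvStepA, pvFilt, hE, hW, ih]
        omega
      · simp [pvStepA, pvFilt, hE, hW, ih]
        omega

theorem pvSolveB_single (l : String) :
    pvSolveB [l] =
      (pvFilt [l],
       (((pvFilt [l]).countP (fun t => PySem.Str.startswith t "ERROR") : Nat) : Int),
       (1 : Int)) := by
  by_cases hE : PySem.Chars.startswith (PySem.Chars.strip l.toList) ['E','R','R','O','R'] = true
  · simp [pvSolveB, pvFilt, hE]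
  · by_cases hW : PySem.Chars.startswith (PySem.Chars.strip l.toList) ['W','A','R','N'] = true
    · simp [pvSolveB, pvFilt, hE, hW]
    · simp [pvSolveB, pvFilt, hE, hW]

theorem pvSolveB_eq (ls : List String) :
    pvSolveB ls =
      (pvFilt ls,
       (((pvFilt ls).countP (fun t => PySem.Str.startswith t "ERROR") : Nat) : Int),
       (ls.length : Int)) := by
  induction ls using pvSolveB.induct with
  | case1 => simp [pvSolveB, pvFilt]
  | case2 l => exact pvSolveB_single l
  | case3 l => exact pvSolveB_single l
  | case4 l => exact pvSolveB_single l
  | case5 l₁ l₂ rest chunk mid ih1 ih2 =>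
    rw [pvSolveB]
    simp only [chunk, mid] at ih1 ih2
    simp only [ih1, ih2]
    have hsplit : pvFilt ((l₁ :: l₂ :: rest).take ((l₁ :: l₂ :: rest).length / 2)) ++
        pvFilt ((l₁ :: l₂ :: rest).drop ((l₁ :: l₂ :: rest).length / 2)) = pvFilt (l₁ :: l₂ :: rest) := by
      simp [pvFilt, ← List.filter_append]
    refine Prod.ext ?_ (Prod.ext ?_ ?_) <;> simp [← hsplit, List.countP_append] <;> omega

-- ===== VERDICT (by name: the statement is the Claim_ definition above) =====
theorem process_log_lines_spec : Claim_equal_process_log_lines := by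
  intro lines _
  unfold Spec_process_log_lines process_log_lines process_log_lines_alt
  simp [pvFoldA, pvSolveB_eq]
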